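-- pv_equiv track=rewrite | github.com/yingzhuo1994/AlgoExpert | PhoneNumberMnemonics.py | phoneNumberMnemonics
-- ===== SOURCE A (Python) =====
-- def phoneNumberMnemonics(phoneNumber):
--     dic = { '1': '1',
--             '2': 'abc',
--             '3': 'def',
--             '4': 'ghi',
--             '5': 'jkl',
--             '6': 'mno',
--             '7': 'pqrs',
--             '8': 'tuv',
--             '9': 'wxyz',
--             '0': '0'
--           }
--     lst = ['']
--     for i, num in enumerate(phoneNumber):
--         lst = [s + ch for s in lst for ch in dic[num]]
--     return lst
-- ===== SOURCE B (Python) =====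
-- def phoneNumberMnemonics(phoneNumber):
--     dic = { '1': '1',
--             '2': 'abc',
--             '3': 'def',
--             '4': 'ghi',
--             '5': 'jkl',
--             '6': 'mno',
--             '7': 'pqrs',
--             '8': 'tuv',
--             '9': 'wxyz',
--             '0': '0'
--           }
--
--     def suffixes(i):
--         # all mnemonics of phoneNumber[i:]
--         if i == len(phoneNumber):
--             return ['']
--         tails = suffixes(i + 1)
--         return [ch + t for ch in dic[phoneNumber[i]] for t in tails]
--
--     return suffixes(0)
-- ===== Notes on version B (the rewrite author's own statement) =====
-- stated objective: alternative
-- what changed: A rebuilds the full prefix list once per digit left-to-right; B recurses from the right, computing all suffix mnemonics of the remaining digits and prepending each letter of the current digit.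
import Mathlib
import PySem

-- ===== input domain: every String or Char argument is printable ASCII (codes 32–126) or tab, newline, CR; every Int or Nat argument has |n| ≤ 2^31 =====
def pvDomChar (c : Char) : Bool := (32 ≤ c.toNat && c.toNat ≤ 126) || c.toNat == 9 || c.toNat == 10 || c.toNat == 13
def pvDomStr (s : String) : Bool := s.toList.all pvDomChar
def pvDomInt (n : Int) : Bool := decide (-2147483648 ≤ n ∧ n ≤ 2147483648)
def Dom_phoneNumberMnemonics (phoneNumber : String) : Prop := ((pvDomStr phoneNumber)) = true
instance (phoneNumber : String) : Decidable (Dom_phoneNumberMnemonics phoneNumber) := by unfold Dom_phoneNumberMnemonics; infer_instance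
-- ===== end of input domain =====

-- B builds the result by right-to-left recursion over suffixes (prepending letters to all
-- tail mnemonics) instead of A's per-digit whole-list prefix rebuild; objective: alternative.

-- ===== PORT A =====
-- the digit→letters dict; a key not in the dict is a KeyError in Python, excluded by Pre_
def pvDicA (c : Char) : List Char :=
  if c = '1' then ['1']
  else if c = '2' then ['a','b','c']
  else if c = '3' then ['d','e','f']
  else if c = '4' then ['g','h','i']
  else if c = '5' then ['j','k','l']
  else if c = '6' then ['m','n','o']
  else if c = '7' then ['p','q','r','s']
  else if c = '8' then ['t','u','v']
  else if c = '9' then ['w','x','y','z']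
  else if c = '0' then ['0']
  else []

def phoneNumberMnemonics (phoneNumber : String) : List String :=
  phoneNumber.toList.foldl
    (fun lst num => lst.flatMap (fun s => (pvDicA num).map (fun ch => s.push ch)))
    [""]

-- ===== PORT B =====
-- B's dict, as B writes it: letter strings looked up per digit
def pvLettersB (c : Char) : String :=
  match c with
  | '1' => "1"
  | '2' => "abc"
  | '3' => "def"
  | '4' => "ghi"
  | '5' => "jkl"
  | '6' => "mno"
  | '7' => "pqrs"
  | '8' => "tuv"
  | '9' => "wxyz"
  | '0' => "0"
  | _   => ""

-- suffixes(i): all mnemonics of the remaining digits, built by prepending each letter to every tail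
def pvSuffixes : List Char → List String
  | [] => [""]
  | num :: rest =>
      let tails := pvSuffixes rest
      (pvLettersB num).toList.flatMap (fun ch => tails.map (fun t => String.singleton ch ++ t))

def phoneNumberMnemonics_alt (phoneNumber : String) : List String :=
  pvSuffixes phoneNumber.toList

-- ===== PRECONDITION & SPEC =====
-- Pre_ excludes exactly the strings containing a non-digit character, on which
-- Python A (and B) raise KeyError at the dict lookup.
def Pre_phoneNumberMnemonics (phoneNumber : String) : Prop :=
  phoneNumber.toList.all (fun c => '0' ≤ c ∧ c ≤ '9') = true
instance (phoneNumber : String) : Decidable (Pre_phoneNumberMnemonics phoneNumber) := by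
  unfold Pre_phoneNumberMnemonics; infer_instance
def pvWitness_phoneNumberMnemonics : String := "1972"

def Spec_phoneNumberMnemonics (phoneNumber : String) (out : List String) : Prop :=
  out = phoneNumberMnemonics_alt phoneNumber
instance (phoneNumber : String) (out : List String) : Decidable (Spec_phoneNumberMnemonics phoneNumber out) := by
  unfold Spec_phoneNumberMnemonics; infer_instance

-- ===== CLAIM (what is proved, stated in full; the proofs are below) =====
def Claim_equal_phoneNumberMnemonics : Prop := ∀ (phoneNumber : String), Dom_phoneNumberMnemonics phoneNumber → Pre_phoneNumberMnemonics phoneNumber → Spec_phoneNumberMnemonics phoneNumber (phoneNumberMnemonics phoneNumber)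

-- ===== LEMMAS AND PROOFS =====
theorem pvLetters_toList (c : Char) : (pvLettersB c).toList = pvDicA c := by
  unfold pvLettersB pvDicA
  split <;> simp_all

theorem pvFold_eq_suffixes (cs : List Char) (lst : List String) :
    cs.foldl (fun lst num => lst.flatMap (fun s => (pvDicA num).map (fun ch => s.push ch))) lst
      = lst.flatMap (fun s => (pvSuffixes cs).map (fun t => s ++ t)) := by
  induction cs generalizing lst with
  | nil => simp [pvSuffixes]
  | cons c rest ih =>
      simp only [List.foldl_cons, ih, pvSuffixes, pvLetters_toList]
      simp only [List.flatMap_assoc, List.map_flatMap, List.flatMap_map, List.map_map]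
      congr 1; funext s; congr 1; funext ch
      congr 1; funext t
      simp only [Function.comp_apply]
      rw [← String.append_assoc]; congr 1

-- ===== VERDICT (by name: the statement is the Claim_ definition above) =====
theorem phoneNumberMnemonics_spec : Claim_equal_phoneNumberMnemonics := by
  intro p _ _
  unfold Spec_phoneNumberMnemonics phoneNumberMnemonics phoneNumberMnemonics_alt
  simpa using pvFold_eq_suffixes p.toList [""]
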